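-- pv_equiv track=rewrite | github.com/Ganon11/AdventCode | 2019/Day8/src/Day8.py | layer_with_min_value_count
-- ===== SOURCE A (Python) =====
-- def count_value_in_layer(layers, layer, value):
--   total = 0
--   for row in range(0, len(layers)):
--     for col in range(0, len(layers[row])):
--       if layers[row][col][layer] == value:
--         total += 1
--   return total
--
-- def layer_with_min_value_count(layers, value):
--   min_count = len(layers) * len(layers[0])
--   min_layer = 0
--   for layer in range(0, len(layers[0][0])):
--     count = count_value_in_layer(layers, layer, value)
--     if count < min_count:
--       min_count = count
--       min_layer = layer
--
--   return min_layer
-- ===== SOURCE B (Python) =====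
-- def layer_with_min_value_count(layers, value):
--   # One pass over the cells maintaining a per-layer count vector, then a
--   # first-strict-minimum scan with A's initial bound and tie-break.
--   nlayers = len(layers[0][0])
--   counts = [0] * nlayers
--   for row in layers:
--     for cell in row:
--       counts = [c + 1 if cell[i] == value else c for i, c in enumerate(counts)]
--   min_count = len(layers) * len(layers[0])
--   min_layer = 0
--   for layer, count in enumerate(counts):
--     if count < min_count:
--       min_count = count
--       min_layer = layer
--   return min_layer
-- ===== Notes on version B (the rewrite author's own statement) =====
-- stated objective: alternative
-- what changed: Instead of re-scanning the whole image once per layer via count_value_in_layer, B makes a single pass over the cells maintaining a per-layer counts vector and then selects the first strict minimum from that vector with A's exact initial bound and tie-break.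
import Mathlib
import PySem

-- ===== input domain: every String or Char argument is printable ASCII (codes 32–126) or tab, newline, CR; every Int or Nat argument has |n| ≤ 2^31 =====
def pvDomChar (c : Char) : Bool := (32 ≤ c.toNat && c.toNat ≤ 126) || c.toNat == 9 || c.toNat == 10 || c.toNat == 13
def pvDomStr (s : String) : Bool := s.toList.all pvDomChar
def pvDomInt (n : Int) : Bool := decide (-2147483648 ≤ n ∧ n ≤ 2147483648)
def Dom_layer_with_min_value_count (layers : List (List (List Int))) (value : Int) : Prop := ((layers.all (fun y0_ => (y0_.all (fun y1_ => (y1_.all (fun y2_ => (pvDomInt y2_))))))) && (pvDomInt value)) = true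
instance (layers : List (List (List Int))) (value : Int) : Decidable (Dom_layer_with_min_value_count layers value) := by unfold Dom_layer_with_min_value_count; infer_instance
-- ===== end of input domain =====

-- B replaces A's per-layer full re-scan of the image by one pass over the cells
-- maintaining a per-layer counts vector, then scans that vector with A's exact
-- initial bound and first-strict-minimum tie-break (objective: alternative).

-- ===== PORT A =====
def count_value_in_layer (layers : List (List (List Int))) (layer : Int) (value : Int) : Int :=
  (PySem.List.pyRange 0 (layers.length : Int) 1).foldl (fun total row =>
    (PySem.List.pyRange 0 ((PySem.List.pyGetD layers row []).length : Int) 1).foldl (fun total col =>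
      if PySem.List.pyGetD (PySem.List.pyGetD (PySem.List.pyGetD layers row []) col []) layer 0 == value
      then total + 1 else total) total) 0

def layer_with_min_value_count (layers : List (List (List Int))) (value : Int) : Int :=
  ((PySem.List.pyRange 0 ((PySem.List.pyGetD (PySem.List.pyGetD layers 0 []) 0 []).length : Int) 1).foldl
    (fun (st : Int × Int) layer =>
      let count := count_value_in_layer layers layer value
      if count < st.1 then (count, layer) else st)
    ((layers.length : Int) * ((PySem.List.pyGetD layers 0 []).length : Int), 0)).2

-- ===== PORT B =====
-- the per-cell comprehension: counts = [c + 1 if cell[i] == value else c for i, c in enumerate(counts)]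
def lwmBump (value : Int) (cell : List Int) (counts : List Int) : List Int :=
  (PySem.List.enumerate counts 0).map
    (fun p => if PySem.List.pyGetD cell p.1 0 == value then p.2 + 1 else p.2)

def layer_with_min_value_count_alt (layers : List (List (List Int))) (value : Int) : Int :=
  let nlayers := (PySem.List.pyGetD (PySem.List.pyGetD layers 0 []) 0 []).length
  let counts := layers.foldl
    (fun counts row => row.foldl (fun counts cell => lwmBump value cell counts) counts)
    (List.replicate nlayers (0 : Int))
  ((PySem.List.enumerate counts 0).foldl
    (fun (st : Int × Int) p => if p.2 < st.1 then (p.2, p.1) else st)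
    ((layers.length : Int) * ((PySem.List.pyGetD layers 0 []).length : Int), 0)).2

-- ===== PRECONDITION & SPEC =====
-- Pre_ is exactly the set on which the Python A returns: layers and its first row
-- must be nonempty (else len(layers[0]) / layers[0][0] raise IndexError), and every
-- cell must have at least len(layers[0][0]) entries (else layers[row][col][layer]
-- raises IndexError for some visited layer index).
def Pre_layer_with_min_value_count (layers : List (List (List Int))) (value : Int) : Prop :=
  layers ≠ [] ∧ layers.headI ≠ [] ∧
    ∀ row ∈ layers, ∀ cell ∈ row, layers.headI.headI.length ≤ cell.length
instance (layers : List (List (List Int))) (value : Int) : Decidable (Pre_layer_with_min_value_count layers value) := by unfold Pre_layer_with_min_value_count; infer_instance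

def pvWitness_layer_with_min_value_count : List (List (List Int)) × Int := ([[[1, 2], [2, 2]], [[2, 1], [1, 1]]], 2)

def Spec_layer_with_min_value_count (layers : List (List (List Int))) (value : Int) (out : Int) : Prop := out = layer_with_min_value_count_alt layers value
instance (layers : List (List (List Int))) (value : Int) (out : Int) : Decidable (Spec_layer_with_min_value_count layers value out) := by unfold Spec_layer_with_min_value_count; infer_instance

-- ===== CLAIM (what is proved, stated in full; the proofs are below) =====
def Claim_equal_layer_with_min_value_count : Prop := ∀ (layers : List (List (List Int))) (value : Int), Dom_layer_with_min_value_count layers value → Pre_layer_with_min_value_count layers value → Spec_layer_with_min_value_count layers value (layer_with_min_value_count layers value)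

-- ===== LEMMAS AND PROOFS =====

-- enumerate over a range-comprehension list, started at the range's start, pairs each index with its value
lemma enum_map_pyRange {α : Type} (g : Int → α) (n : Nat) : ∀ (a : Int),
    PySem.List.enumerate ((PySem.List.pyRange a (a + n) 1).map g) a
      = (PySem.List.pyRange a (a + n) 1).map (fun i => (i, g i)) := by
  induction n with
  | zero =>
    intro a
    simp [PySem.List.pyRange_one_eq_nil (le_refl a)]
  | succ m ih =>
    intro a
    rw [PySem.List.pyRange_one_cons (by omega : a < a + ((m : Nat) + 1 : Nat))]
    simp only [List.map_cons, PySem.List.enumerate_cons]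
    have h : a + ((m : Nat) + 1 : Nat) = (a + 1) + (m : Nat) := by push_cast; ring
    rw [h, ih (a + 1)]

-- one cell's bump of a range-comprehension counts vector
lemma bump_map (value : Int) (cell : List Int) (g : Int → Int) (n : Nat) :
    lwmBump value cell ((PySem.List.pyRange 0 (n : Int) 1).map g)
      = (PySem.List.pyRange 0 (n : Int) 1).map
          (fun i => if PySem.List.pyGetD cell i 0 == value then g i + 1 else g i) := by
  unfold lwmBump
  have h0 : ((0 : Int) + (n : Nat)) = (n : Int) := by omega
  rw [show PySem.List.pyRange 0 (n : Int) 1 = PySem.List.pyRange 0 ((0 : Int) + (n : Nat)) 1 by rw [h0]]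
  rw [enum_map_pyRange g n 0, List.map_map]
  rfl

-- folding the bump over a list of cells counts, per layer, the matching cells
lemma fold_bump (value : Int) (n : Nat) (cells : List (List Int)) : ∀ (g : Int → Int),
    cells.foldl (fun counts cell => lwmBump value cell counts) ((PySem.List.pyRange 0 (n : Int) 1).map g)
      = (PySem.List.pyRange 0 (n : Int) 1).map
          (fun i => g i + (cells.countP (fun cell => PySem.List.pyGetD cell i 0 == value) : Int)) := by
  induction cells with
  | nil => intro g; simp
  | cons c cs ih =>
    intro g
    simp only [List.foldl_cons]
    rw [bump_map, ih]
    apply congrArg (fun f => List.map f (PySem.List.pyRange 0 (n : Int) 1))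
    funext i
    by_cases h : PySem.List.pyGetD c i 0 == value <;> simp [h] <;> ring

-- A's helper counts the matching cells of the flattened image
lemma count_A (layers : List (List (List Int))) (layer value : Int) :
    count_value_in_layer layers layer value
      = (layers.flatten.countP (fun cell => PySem.List.pyGetD cell layer 0 == value) : Int) := by
  unfold count_value_in_layer
  rw [PySem.List.foldl_pyRange_zero_pyGetD' layers []
    (fun total row =>
      (PySem.List.pyRange 0 ((row.length : Nat) : Int) 1).foldl (fun t col =>
        if PySem.List.pyGetD (PySem.List.pyGetD row col []) layer 0 == value
        then t + 1 else t) total) 0]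
  have hrow : (fun (total : Int) (row : List (List Int)) =>
      (PySem.List.pyRange 0 ((row.length : Nat) : Int) 1).foldl (fun t col =>
        if PySem.List.pyGetD (PySem.List.pyGetD row col []) layer 0 == value
        then t + 1 else t) total)
    = (fun (total : Int) (row : List (List Int)) =>
        row.foldl (fun t cell =>
          if PySem.List.pyGetD cell layer 0 == value then t + 1 else t) total) := by
    funext total row
    exact PySem.List.foldl_pyRange_zero_pyGetD' row []
      (fun t cell => if PySem.List.pyGetD cell layer 0 == value then t + 1 else t) total
  rw [hrow, ← List.foldl_flatten,
    PySem.List.foldl_count_if (fun cell => PySem.List.pyGetD cell layer 0 == value) layers.flatten 0]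
  ring

-- ===== VERDICT (by name: the statement is the Claim_ definition above) =====
theorem layer_with_min_value_count_spec : Claim_equal_layer_with_min_value_count := by
  intro layers value _ _
  unfold Spec_layer_with_min_value_count layer_with_min_value_count layer_with_min_value_count_alt
  set n := (PySem.List.pyGetD (PySem.List.pyGetD layers 0 []) 0 []).length with hn
  -- B's counts vector is the range comprehension of per-layer counts
  have hrep : List.replicate n (0 : Int) = (PySem.List.pyRange 0 (n : Int) 1).map (fun _ => (0 : Int)) := by
    rw [List.map_const', PySem.List.length_pyRange_one]
    norm_num
  have hcounts : layers.foldl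
      (fun counts row => row.foldl (fun counts cell => lwmBump value cell counts) counts)
      (List.replicate n (0 : Int))
    = (PySem.List.pyRange 0 (n : Int) 1).map
        (fun i => (layers.flatten.countP (fun cell => PySem.List.pyGetD cell i 0 == value) : Int)) := by
    rw [hrep, ← List.foldl_flatten, fold_bump value n layers.flatten (fun _ => (0 : Int))]
    simp
  simp only [hcounts]
  -- rewrite B's selection scan over enumerate into a scan over the index range
  have h0 : ((0 : Int) + (n : Nat)) = (n : Int) := by omega
  rw [show PySem.List.pyRange 0 (n : Int) 1 = PySem.List.pyRange 0 ((0 : Int) + (n : Nat)) 1 by rw [h0]]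
  rw [enum_map_pyRange (fun i => (layers.flatten.countP (fun cell => PySem.List.pyGetD cell i 0 == value) : Int)) n 0]
  rw [List.foldl_map]
  rw [h0]
  -- A's per-layer recount is the same per-layer count
  have hbody : (fun (st : Int × Int) (layer : Int) =>
      if count_value_in_layer layers layer value < st.1
      then (count_value_in_layer layers layer value, layer) else st)
    = (fun (st : Int × Int) (i : Int) =>
        if ((layers.flatten.countP (fun cell => PySem.List.pyGetD cell i 0 == value) : Int)) < st.1
        then (((layers.flatten.countP (fun cell => PySem.List.pyGetD cell i 0 == value) : Int)), i)
        else st) := by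
    funext st i
    rw [count_A layers i value]
  rw [hbody]
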